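-- pv_equiv track=rewrite | github.com/wzx140/wxRebot | run.py | get_nick_name
-- ===== SOURCE A (Python) =====
-- def get_nick_name(user_name, contact_list):
--     nick_name = ''
--     for contact in contact_list:
--         if contact['UserName'] == user_name:
--             nick_name = contact['NickName']
--     if nick_name:
--         return nick_name
--     else:
--         return '未知联系人'
-- ===== SOURCE B (Python) =====
-- def get_nick_name(user_name, contact_list):
--     for contact in reversed(contact_list):
--         if contact['UserName'] == user_name:
--             nick = contact['NickName']
--             return nick if nick else '未知联系人'
--     return '未知联系人'
-- ===== Notes on version B (the rewrite author's own statement) =====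
-- stated objective: alternative
-- what changed: Replaces A's full forward overwrite-scan with a reversed scan that early-returns at the first match (last match wins by construction), so the loop stops as soon as the decisive contact is found instead of always traversing the whole list.
import Mathlib
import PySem

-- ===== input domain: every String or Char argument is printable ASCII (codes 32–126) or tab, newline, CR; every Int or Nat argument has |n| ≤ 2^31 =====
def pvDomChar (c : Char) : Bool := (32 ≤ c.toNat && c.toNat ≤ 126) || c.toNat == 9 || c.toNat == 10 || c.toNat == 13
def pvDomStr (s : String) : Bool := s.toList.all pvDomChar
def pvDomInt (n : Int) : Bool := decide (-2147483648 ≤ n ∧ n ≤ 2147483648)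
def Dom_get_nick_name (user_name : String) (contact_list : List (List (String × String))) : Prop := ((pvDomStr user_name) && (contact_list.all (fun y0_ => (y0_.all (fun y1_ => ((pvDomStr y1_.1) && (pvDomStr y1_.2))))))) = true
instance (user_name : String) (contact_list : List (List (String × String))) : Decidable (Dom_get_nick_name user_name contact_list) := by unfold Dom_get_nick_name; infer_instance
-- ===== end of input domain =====

-- B scans the contact list in REVERSE and early-returns at the first match (so the last
-- match wins by construction), instead of A's full forward scan that overwrites an
-- accumulator on every match. Objective: alternative (early exit, same asymptotics).

-- ===== PORT A =====
-- A: linear forward scan, overwriting nick_name on every match (contact['UserName'] /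
-- contact['NickName'] raise KeyError when absent — excluded by Pre_; the port uses getD "" there).
def get_nick_name (user_name : String) (contact_list : List (List (String × String))) : String :=
  let nick_name := contact_list.foldl (fun nick_name contact =>
    if (PySem.Dict.mk contact).getD "UserName" "" == user_name then
      (PySem.Dict.mk contact).getD "NickName" ""
    else nick_name) ""
  if nick_name ≠ "" then nick_name else "未知联系人"

-- ===== PORT B =====
-- B's loop over reversed(contact_list): first match returns its NickName (with truthiness fallback).
def get_nick_name_rev_scan (user_name : String) : List (List (String × String)) → String
  | [] => "未知联系人"
  | contact :: rest =>
    if (PySem.Dict.mk contact).getD "UserName" "" == user_name then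
      let nick := (PySem.Dict.mk contact).getD "NickName" ""
      if nick ≠ "" then nick else "未知联系人"
    else get_nick_name_rev_scan user_name rest

def get_nick_name_alt (user_name : String) (contact_list : List (List (String × String))) : String :=
  get_nick_name_rev_scan user_name contact_list.reverse

-- ===== PRECONDITION & SPEC =====
-- Pre_: exactly the inputs on which the Python A returns (every contact has a 'UserName' key,
-- and each contact whose 'UserName' equals user_name also has a 'NickName' key); elsewhere A raises KeyError.
def Pre_get_nick_name (user_name : String) (contact_list : List (List (String × String))) : Prop :=
  ∀ c ∈ contact_list, ((PySem.Dict.mk c).get? "UserName").isSome ∧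
    ((PySem.Dict.mk c).get? "UserName" = some user_name → ((PySem.Dict.mk c).get? "NickName").isSome)
instance (user_name : String) (contact_list : List (List (String × String))) : Decidable (Pre_get_nick_name user_name contact_list) := by unfold Pre_get_nick_name; infer_instance
def pvWitness_get_nick_name : String × (List (List (String × String))) :=
  ("u1", [[("UserName", "u1"), ("NickName", "Bob")], [("UserName", "u2"), ("NickName", "")]])
def Spec_get_nick_name (user_name : String) (contact_list : List (List (String × String))) (out : String) : Prop := out = get_nick_name_alt user_name contact_list
instance (user_name : String) (contact_list : List (List (String × String))) (out : String) : Decidable (Spec_get_nick_name user_name contact_list out) := by unfold Spec_get_nick_name; infer_instance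

-- ===== CLAIM =====
def Claim_equal_get_nick_name : Prop := ∀ (user_name : String) (contact_list : List (List (String × String))), Dom_get_nick_name user_name contact_list → Pre_get_nick_name user_name contact_list → Spec_get_nick_name user_name contact_list (get_nick_name user_name contact_list)

-- ===== LEMMAS AND PROOFS =====

-- A's forward overwrite fold, read via foldr over the reversed list, equals B's
-- reversed first-match scan (unconditionally).
theorem pv_revscan_eq (u : String) (rl : List (List (String × String))) :
    (let nick := rl.foldr (fun c acc =>
        if (PySem.Dict.mk c).getD "UserName" "" == u then (PySem.Dict.mk c).getD "NickName" ""
        else acc) "";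
     if nick ≠ "" then nick else "未知联系人")
    = get_nick_name_rev_scan u rl := by
  induction rl with
  | nil => rfl
  | cons c t ih =>
    simp only [List.foldr_cons, get_nick_name_rev_scan]
    by_cases h : ((PySem.Dict.mk c).getD "UserName" "" == u) = true
    · simp [h]
    · simp only [h, if_neg (fun hh => h hh)]
      exact ih

-- ===== VERDICT =====
theorem get_nick_name_spec : Claim_equal_get_nick_name := by
  intro u cl _ _
  unfold Spec_get_nick_name get_nick_name get_nick_name_alt
  rw [← pv_revscan_eq u cl.reverse]
  rw [List.foldl_eq_foldr_reverse]
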